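-- pv_equiv track=rewrite | github.com/Dannyednut/Bincom | Interviews/Bincom_Interview_test.py | mean_color
-- ===== SOURCE A (Python) =====
-- def distinct(data):
--     distinct_colors = []
--     for i in data:
--         if i not in distinct_colors:
--             distinct_colors.append(i)
--         else:
--             pass
--     return distinct_colors
--
-- def create_map(data):
--     distinct_colors = distinct(data)
--     value = 1
--     color_map = {}
--     for i in distinct_colors:
--         color_map[i] = value
--         value+=1
--     return color_map
--
-- def mean_color(data: list):
--     # Create a dictionary color:value map
--     color_map = create_map(data)
--
--     # Convert all colors to numbers
--     colors = data
--     color_numbers = [color_map[i] for i in colors]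
--
--     # Mean color
--     mean_value = sum(color_numbers)//len(color_numbers)
--     for i in color_map:
--         if color_map[i] == mean_value:
--             color = i
--             break
--     return color
-- ===== SOURCE B (Python) =====
-- def mean_color(data: list):
--     # Distinct colors in first-occurrence order; ordinal of distinct[i] is i+1.
--     distinct = list(dict.fromkeys(data))
--     # Ordinal total grouped by distinct color: (index+1) * multiplicity.
--     total = sum((i + 1) * data.count(c) for i, c in enumerate(distinct))
--     mean = total // len(data)
--     return distinct[mean - 1]
-- ===== Notes on version B (the rewrite author's own statement) =====
-- stated objective: simpler
-- what changed: B drops the color_map dict, the flat per-element ordinal list and the inversion scan: it builds the first-occurrence distinct list once, computes the ordinal total grouped as (index+1)*count per distinct color, and returns distinct[mean-1] by direct indexing.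
import Mathlib
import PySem

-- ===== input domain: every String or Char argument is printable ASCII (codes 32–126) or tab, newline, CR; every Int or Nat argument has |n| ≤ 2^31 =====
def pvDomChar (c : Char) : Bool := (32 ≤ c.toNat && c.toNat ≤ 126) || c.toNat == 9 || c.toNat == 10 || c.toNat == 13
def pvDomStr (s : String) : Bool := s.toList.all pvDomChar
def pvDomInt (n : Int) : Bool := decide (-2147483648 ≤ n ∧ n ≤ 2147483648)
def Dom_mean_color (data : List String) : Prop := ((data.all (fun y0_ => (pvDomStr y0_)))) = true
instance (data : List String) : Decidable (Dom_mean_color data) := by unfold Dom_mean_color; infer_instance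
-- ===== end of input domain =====

-- B replaces A's color_map dict, flat per-element ordinal list and inversion scan by a grouped
-- ordinal sum over the distinct list and direct indexing (objective: simpler).

-- ===== PORT A =====
def pvDistinctA (data : List String) : List String :=
  data.foldl (fun acc i => if acc.contains i then acc else acc ++ [i]) []

-- helper create_map(data): the loop carries (color_map, value)
def pvCreateMap (data : List String) : PySem.Dict String Int :=
  ((pvDistinctA data).foldl
    (fun (st : PySem.Dict String Int × Int) i => (st.1.insert i st.2, st.2 + 1))
    (PySem.Dict.empty, 1)).1

-- the final 'for i in color_map: if color_map[i] == mean_value: color = i; break'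
-- (the [] case is Python's fall-through leaving 'color' unbound; unreachable under Pre_)
def pvFindA (items : List (String × Int)) (mv : Int) : String :=
  match items with
  | [] => ""
  | (k, v) :: rest => if v = mv then k else pvFindA rest mv

-- every i of data is a key of color_map, so color_map[i] never raises (getD's default unused)
def mean_color (data : List String) : String :=
  let color_map := pvCreateMap data
  let color_numbers := data.map (fun i => color_map.getD i 0)
  let mean_value := PySem.Int.floordiv color_numbers.sum (data.length)
  pvFindA color_map.items mean_value

-- ===== PORT B =====
def mean_color_alt (data : List String) : String :=
  let distinct := PySem.List.dedup data
  let total := ((PySem.List.enumerate distinct).map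
    (fun p => (p.1 + 1) * (PySem.List.count data p.2 : Int))).sum
  let mean := PySem.Int.floordiv total data.length
  (PySem.List.pyGet? distinct (mean - 1)).getD ""  -- index in range whenever data ≠ [] (proved below)


-- ===== PRECONDITION & SPEC =====
-- Pre_ excludes only the empty list, on which both Pythons raise ZeroDivisionError.
def Pre_mean_color (data : List String) : Prop := data ≠ []
instance (data : List String) : Decidable (Pre_mean_color data) := by unfold Pre_mean_color; infer_instance
def pvWitness_mean_color : List String := ["red", "green", "red"]

def Spec_mean_color (data : List String) (out : String) : Prop := out = mean_color_alt data
instance (data : List String) (out : String) : Decidable (Spec_mean_color data out) := by unfold Spec_mean_color; infer_instance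

-- ===== CLAIM (what is proved, stated in full; the proofs are below) =====
def Claim_equal_mean_color : Prop := ∀ (data : List String), Dom_mean_color data → Pre_mean_color data → Spec_mean_color data (mean_color data)

-- ===== LEMMAS AND PROOFS =====

-- L2: the create_map fold over distinct keys appends (key, ordinal) pairs
lemma foldl_insert_items (l : List String) : ∀ (d0 : PySem.Dict String Int) (v : Int),
    l.Nodup → (∀ a ∈ l, d0.contains a = false) →
    ((l.foldl (fun (st : PySem.Dict String Int × Int) i => (st.1.insert i st.2, st.2 + 1)) (d0, v)).1).items
      = d0.items ++ (PySem.List.enumerate l v).map (fun p => (p.2, p.1)) := by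
  induction l with
  | nil => intro d0 v _ _; simp [PySem.List.enumerate]
  | cons a l ih =>
    intro d0 v hnd hc
    have ha : d0.contains a = false := hc a (by simp)
    have hc' : ∀ b ∈ l, (d0.insert a v).contains b = false := by
      intro b hb
      have hba : b ≠ a := by
        intro h; subst h; exact (List.nodup_cons.mp hnd).1 hb
      rw [PySem.Dict.contains_eq_isSome_get?, PySem.Dict.get?_insert, if_neg hba,
        ← PySem.Dict.contains_eq_isSome_get?]
      exact hc b (by simp [hb])
    rw [List.foldl_cons]
    have := ih (d0.insert a v) (v + 1) (List.nodup_cons.mp hnd).2 hc'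
    simp only [this, PySem.Dict.items_insert_of_not_contains d0 v ha,
      PySem.List.enumerate_cons, List.map_cons, List.append_assoc, List.cons_append, List.nil_append]

lemma createMap_items (data : List String) :
    (pvCreateMap data).items
      = (PySem.List.enumerate (PySem.List.dedup data) 1).map (fun p => (p.2, p.1)) := by
  have e : pvDistinctA data = PySem.List.dedup data := rfl
  have h := foldl_insert_items (PySem.List.dedup data) PySem.Dict.empty 1
    (PySem.List.nodup_dedup data) (by intro a _; rfl)
  rw [pvCreateMap, e, h]
  rfl

lemma createMap_keys (data : List String) :
    (pvCreateMap data).keys = PySem.List.dedup data := by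
  simp only [PySem.Dict.keys, createMap_items, List.map_map]
  exact PySem.List.map_snd_enumerate _ 1

lemma createMap_getD (data : List String) (j : Nat)
    (hj : j < (PySem.List.dedup data).length) :
    (pvCreateMap data).getD (PySem.List.dedup data)[j] 0 = 1 + (j : Int) := by
  apply PySem.Dict.getD_of_mem_items
  · rw [createMap_items]
    simp only [List.mem_map]
    exact ⟨(1 + (j : Int), (PySem.List.dedup data)[j]),
      (PySem.List.mem_enumerate_iff _ _ _).mpr ⟨j, hj, rfl⟩, rfl⟩
  · rw [createMap_keys]; exact PySem.List.nodup_dedup data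

-- L5b: indicator sum over a list not containing a is 0
lemma indic_sum_zero (f : String → Int) (a : String) : ∀ (d : List String) (s : Int), a ∉ d →
    ((PySem.List.enumerate d s).map (fun p => f p.2 * (if p.2 = a then 1 else 0))).sum = 0 := by
  intro d
  induction d with
  | nil => intro s _; simp [PySem.List.enumerate]
  | cons b d ih =>
    intro s hna
    rw [PySem.List.enumerate_cons]
    simp only [List.map_cons, List.sum_cons]
    rw [if_neg (by rintro rfl; exact hna (by simp)), ih (s+1) (fun h => hna (by simp [h]))]
    ring

-- L5: indicator sum picks out f a
lemma indic_sum (f : String → Int) (a : String) : ∀ (d : List String) (s : Int), d.Nodup → a ∈ d →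
    ((PySem.List.enumerate d s).map (fun p => f p.2 * (if p.2 = a then 1 else 0))).sum = f a := by
  intro d
  induction d with
  | nil => intro s _ h; simp at h
  | cons b d ih =>
    intro s hnd hmem
    rw [PySem.List.enumerate_cons]
    simp only [List.map_cons, List.sum_cons]
    by_cases hba : b = a
    · subst hba
      rw [if_pos rfl, indic_sum_zero f b d (s+1) (List.nodup_cons.mp hnd).1]
      ring
    · rw [if_neg hba, ih (s+1) (List.nodup_cons.mp hnd).2 (by
        rcases List.mem_cons.mp hmem with h | h
        · exact absurd h.symm hba
        · exact h)]
      ring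

-- L6: grouping a sum over ys by the distinct list d
lemma group_sum (f : String → Int) (d : List String) (hnd : d.Nodup) :
    ∀ (ys : List String), (∀ x ∈ ys, x ∈ d) →
    (ys.map f).sum
      = ((PySem.List.enumerate d 0).map (fun p => f p.2 * (List.count p.2 ys : Int))).sum := by
  intro ys
  induction ys with
  | nil => intro _; simp
  | cons a ys ih =>
    intro hsub
    simp only [List.map_cons, List.sum_cons]
    rw [ih (fun x hx => hsub x (by simp [hx]))]
    have : ∀ p : Int × String, f p.2 * (List.count p.2 (a :: ys) : Int)
        = f p.2 * (List.count p.2 ys : Int) + f p.2 * (if p.2 = a then 1 else 0) := by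
      intro p
      by_cases h : p.2 = a
      · subst h
        rw [List.count_cons_self]
        simp
        ring
      · have hb : (a == p.2) = false := beq_eq_false_iff_ne.mpr (fun e => h e.symm)
        rw [List.count_cons, hb]
        simp [h]
    simp only [this]
    rw [PySem.List.sum_map_add_int]
    rw [indic_sum f a d 0 hnd (hsub a (by simp))]
    ring

-- L7: the break-scan over (color, ordinal) pairs is direct indexing
lemma findA_enumerate (mv : Int) : ∀ (d : List String) (s : Int),
    pvFindA ((PySem.List.enumerate d s).map (fun p => (p.2, p.1))) mv
      = if s ≤ mv ∧ mv < s + d.length then d.getD (mv - s).toNat "" else "" := by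
  intro d
  induction d with
  | nil => intro s; simp [PySem.List.enumerate, pvFindA]
  | cons b d ih =>
    intro s
    rw [PySem.List.enumerate_cons]
    simp only [List.map_cons, pvFindA]
    by_cases hs : s = mv
    · subst hs
      rw [if_pos rfl, if_pos (by constructor <;> simp)]
      simp
    · rw [if_neg hs, ih (s + 1)]
      by_cases h1 : s + 1 ≤ mv ∧ mv < s + 1 + d.length
      · rw [if_pos h1, if_pos (by constructor <;> [omega; (simp; omega)])]
        have h2 : (mv - s).toNat = (mv - (s+1)).toNat + 1 := by omega
        rw [h2]
        simp [List.getD]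
      · rw [if_neg h1, if_neg (by simp; omega)]

-- L8: sum bounds
lemma sum_bounds (k : Int) : ∀ (ys : List Int), (∀ x ∈ ys, 1 ≤ x ∧ x ≤ k) →
    (ys.length : Int) ≤ ys.sum ∧ ys.sum ≤ k * ys.length := by
  intro ys
  induction ys with
  | nil => intro _; simp
  | cons a ys ih =>
    intro h
    have ha := h a (by simp)
    have := ih (fun x hx => h x (by simp [hx]))
    simp only [List.sum_cons, List.length_cons]
    push_cast
    constructor <;> nlinarith [this.1, this.2, ha.1, ha.2]

theorem pv_main : ∀ (data : List String), data ≠ [] → mean_color data = mean_color_alt data := by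
  intro data hne
  unfold mean_color mean_color_alt
  dsimp only
  set d := PySem.List.dedup data with hd
  set cm := pvCreateMap data with hcm
  set f : String → Int := fun i => cm.getD i 0 with hf
  -- f x = idxOf + 1 for x ∈ data
  have hfval : ∀ x ∈ d, f x = 1 + (List.idxOf x d : Int) := by
    intro x hx
    have hlt : List.idxOf x d < d.length := List.idxOf_lt_length_of_mem hx
    have := createMap_getD data (List.idxOf x d) hlt
    rwa [List.getElem_idxOf hlt] at this
  -- sums agree
  have hsum : (data.map f).sum
      = ((PySem.List.enumerate d).map (fun p => (p.1 + 1) * (PySem.List.count data p.2 : Int))).sum := by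
    rw [group_sum f d (PySem.List.nodup_dedup data) data
      (fun x hx => (PySem.List.mem_dedup data x).mpr hx)]
    apply congrArg List.sum
    apply List.map_congr_left
    intro p hp
    rcases (PySem.List.mem_enumerate_iff d 0 p).mp hp with ⟨j, hj, rfl⟩
    simp only [PySem.List.count_eq]
    rw [hfval _ (by exact List.getElem_mem hj)]
    rw [List.Nodup.idxOf_getElem (PySem.List.nodup_dedup data) j hj]
    push_cast
    ring
  set total := ((PySem.List.enumerate d).map (fun p => (p.1 + 1) * (PySem.List.count data p.2 : Int))).sum with ht
  rw [hsum]
  set mv := PySem.Int.floordiv total data.length with hmv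
  -- bounds
  have hn : 0 < (data.length : Int) := by
    simp [List.length_pos_iff]; exact hne
  have hkpos : 0 < (d.length : Int) := by
    have hd' : d ≠ [] := by
      cases data with
      | nil => exact absurd rfl hne
      | cons a l =>
        exact List.ne_nil_of_mem ((PySem.List.mem_dedup (a :: l) a).mpr (by simp))
    simp [List.length_pos_iff]; exact hd'
  have hbounds := sum_bounds (d.length : Int) (data.map f) (by
    intro x hx
    rcases List.mem_map.mp hx with ⟨y, hy, rfl⟩
    have hyd : y ∈ d := (PySem.List.mem_dedup data y).mpr hy
    rw [hfval y hyd]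
    have := List.idxOf_lt_length_of_mem hyd
    omega)
  rw [hsum] at hbounds
  simp only [List.length_map] at hbounds
  have h1 : 1 ≤ mv := by
    rw [hmv, PySem.Int.le_floordiv_iff_mul_le hn]
    linarith [hbounds.1]
  have h2 : mv < 1 + (d.length : Int) := by
    rw [hmv, PySem.Int.floordiv_lt_iff_lt_mul hn]
    nlinarith [hbounds.2]
  -- A side
  rw [createMap_items data, findA_enumerate, if_pos ⟨h1, by omega⟩]
  -- B side
  have hge : 0 ≤ mv - 1 := by omega
  have hlt : (mv - 1).toNat < d.length := by omega
  rw [PySem.List.pyGet?]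
  rw [PySem.List.pyIdx?]
  rw [if_pos hge, if_pos (by omega)]
  simp only [Option.bind_some]
  rw [List.getElem?_eq_getElem (by omega), List.getD_eq_getElem?_getD,
    List.getElem?_eq_getElem (by omega)]

-- ===== VERDICT (by name: the statement is the Claim_ definition above) =====
theorem mean_color_spec : Claim_equal_mean_color := by
  intro data _ hpre
  exact pv_main data hpre
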